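-- pv_equiv track=rewrite | github.com/shinkeonkim/boj-solution-archiving-site | data/source/24465_97998472.py | constellation_number
-- ===== SOURCE A (Python) =====
-- def constellation_number(m, d):
--   constellation = [20, 19, 21, 20, 21, 22, 23, 23, 23, 23, 23, 22]
--
--   for i in range(12):
--     if m == i + 1 and constellation[i] <= d:
--       return i + 1
--
--     next_i = (i + 2)
--     if next_i == 13:
--       next_i = 1
--     if m == next_i and d < constellation[(i + 1 ) % 12]:
--       return i + 1
-- ===== SOURCE B (Python) =====
-- def constellation_number(m, d):
--     boundary = [20, 19, 21, 20, 21, 22, 23, 23, 23, 23, 23, 22]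
--     if not (1 <= m <= 12):
--         return None
--     if d >= boundary[m - 1]:
--         return m
--     return 12 if m == 1 else m - 1
-- ===== Notes on version B (the rewrite author's own statement) =====
-- stated objective: simpler
-- what changed: Replaced the 12-iteration scan with its two per-iteration conditions by a single O(1) table lookup: return m if d >= boundary[m-1], else m-1 (12 for January), with a direct range guard for months outside 1..12.
import Mathlib
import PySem

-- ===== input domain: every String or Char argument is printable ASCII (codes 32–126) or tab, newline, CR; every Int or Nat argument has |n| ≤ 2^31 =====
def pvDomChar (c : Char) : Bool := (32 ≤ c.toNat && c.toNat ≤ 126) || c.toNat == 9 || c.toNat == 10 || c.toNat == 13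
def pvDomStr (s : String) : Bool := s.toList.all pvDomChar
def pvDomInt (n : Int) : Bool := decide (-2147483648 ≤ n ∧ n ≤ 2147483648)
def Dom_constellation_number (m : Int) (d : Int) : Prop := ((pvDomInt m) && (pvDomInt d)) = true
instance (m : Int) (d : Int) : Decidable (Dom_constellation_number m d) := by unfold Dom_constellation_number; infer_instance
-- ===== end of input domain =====

-- B replaces A's 12-iteration scan by a range guard plus one table lookup (objective: simpler).

-- ===== PORT A =====
-- literal port of A's for-loop with early return; the literal indices i and (i+1) % 12 are always
-- in bounds for the 12-element table, so getD is exact here.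
def cnLoop (m : Int) (d : Int) (cons : List Int) : List Nat → Option Int
  | [] => none
  | i :: rest =>
    if m = (i : Int) + 1 ∧ cons.getD i 0 ≤ d then some ((i : Int) + 1)
    else
      let next_i : Int := if ((i : Int) + 2) = 13 then 1 else (i : Int) + 2
      if m = next_i ∧ d < cons.getD ((i + 1) % 12) 0 then some ((i : Int) + 1)
      else cnLoop m d cons rest

def constellation_number (m : Int) (d : Int) : Option Int :=
  cnLoop m d [20, 19, 21, 20, 21, 22, 23, 23, 23, 23, 23, 22] (List.range 12)

-- ===== PORT B =====
-- Source B: guard the month range, then one lookup; the index m-1 is in 0..11 under the guard, so getD is exact.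
def constellation_number_alt (m : Int) (d : Int) : Option Int :=
  let boundary : List Int := [20, 19, 21, 20, 21, 22, 23, 23, 23, 23, 23, 22]
  if ¬ (1 ≤ m ∧ m ≤ 12) then none
  else if boundary.getD (m - 1).toNat 0 ≤ d then some m
  else if m = 1 then some 12 else some (m - 1)

-- ===== PRECONDITION & SPEC =====
def Spec_constellation_number (m : Int) (d : Int) (out : Option Int) : Prop := out = constellation_number_alt m d
instance (m : Int) (d : Int) (out : Option Int) : Decidable (Spec_constellation_number m d out) := by unfold Spec_constellation_number; infer_instance

-- ===== CLAIM (what is proved, stated in full; the proofs are below) =====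
def Claim_equal_constellation_number : Prop := ∀ (m : Int) (d : Int), Dom_constellation_number m d → Spec_constellation_number m d (constellation_number m d)

-- ===== LEMMAS AND PROOFS =====
-- if every month-match condition in the loop is false, A's loop falls through to none
theorem cnLoop_none (m : Int) (d : Int) (cons : List Int) (l : List Nat)
    (h : ∀ i ∈ l, ¬(m = (i : Int) + 1) ∧
      ¬(m = if ((i : Int) + 2) = 13 then 1 else (i : Int) + 2)) :
    cnLoop m d cons l = none := by
  induction l with
  | nil => rfl
  | cons i rest ih =>
    obtain ⟨h1, h2⟩ := h i (List.mem_cons_self ..)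
    simp only [cnLoop, h1, false_and, if_false]
    rw [if_neg (by exact fun hc => h2 hc.1)]
    exact ih fun j hj => h j (List.mem_cons_of_mem _ hj)

-- closed form of A's loop for each month in range
theorem pvMonth1 (d : Int) :
    cnLoop 1 d [20, 19, 21, 20, 21, 22, 23, 23, 23, 23, 23, 22] (List.range 12) =
      if (20 : Int) ≤ d then some 1 else some 12 := by
  norm_num [cnLoop, List.range_succ]
  split_ifs <;> first | rfl | omega

theorem pvMonth2 (d : Int) :
    cnLoop 2 d [20, 19, 21, 20, 21, 22, 23, 23, 23, 23, 23, 22] (List.range 12) =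
      if (19 : Int) ≤ d then some 2 else some 1 := by
  norm_num [cnLoop, List.range_succ]
  split_ifs <;> first | rfl | omega

theorem pvMonth3 (d : Int) :
    cnLoop 3 d [20, 19, 21, 20, 21, 22, 23, 23, 23, 23, 23, 22] (List.range 12) =
      if (21 : Int) ≤ d then some 3 else some 2 := by
  norm_num [cnLoop, List.range_succ]
  split_ifs <;> first | rfl | omega

theorem pvMonth4 (d : Int) :
    cnLoop 4 d [20, 19, 21, 20, 21, 22, 23, 23, 23, 23, 23, 22] (List.range 12) =
      if (20 : Int) ≤ d then some 4 else some 3 := by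
  norm_num [cnLoop, List.range_succ]
  split_ifs <;> first | rfl | omega

theorem pvMonth5 (d : Int) :
    cnLoop 5 d [20, 19, 21, 20, 21, 22, 23, 23, 23, 23, 23, 22] (List.range 12) =
      if (21 : Int) ≤ d then some 5 else some 4 := by
  norm_num [cnLoop, List.range_succ]
  split_ifs <;> first | rfl | omega

theorem pvMonth6 (d : Int) :
    cnLoop 6 d [20, 19, 21, 20, 21, 22, 23, 23, 23, 23, 23, 22] (List.range 12) =
      if (22 : Int) ≤ d then some 6 else some 5 := by
  norm_num [cnLoop, List.range_succ]
  split_ifs <;> first | rfl | omega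

theorem pvMonth7 (d : Int) :
    cnLoop 7 d [20, 19, 21, 20, 21, 22, 23, 23, 23, 23, 23, 22] (List.range 12) =
      if (23 : Int) ≤ d then some 7 else some 6 := by
  norm_num [cnLoop, List.range_succ]
  split_ifs <;> first | rfl | omega

theorem pvMonth8 (d : Int) :
    cnLoop 8 d [20, 19, 21, 20, 21, 22, 23, 23, 23, 23, 23, 22] (List.range 12) =
      if (23 : Int) ≤ d then some 8 else some 7 := by
  norm_num [cnLoop, List.range_succ]
  split_ifs <;> first | rfl | omega

theorem pvMonth9 (d : Int) :
    cnLoop 9 d [20, 19, 21, 20, 21, 22, 23, 23, 23, 23, 23, 22] (List.range 12) =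
      if (23 : Int) ≤ d then some 9 else some 8 := by
  norm_num [cnLoop, List.range_succ]
  split_ifs <;> first | rfl | omega

theorem pvMonth10 (d : Int) :
    cnLoop 10 d [20, 19, 21, 20, 21, 22, 23, 23, 23, 23, 23, 22] (List.range 12) =
      if (23 : Int) ≤ d then some 10 else some 9 := by
  norm_num [cnLoop, List.range_succ]
  split_ifs <;> first | rfl | omega

theorem pvMonth11 (d : Int) :
    cnLoop 11 d [20, 19, 21, 20, 21, 22, 23, 23, 23, 23, 23, 22] (List.range 12) =
      if (23 : Int) ≤ d then some 11 else some 10 := by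
  norm_num [cnLoop, List.range_succ]
  split_ifs <;> first | rfl | omega

theorem pvMonth12 (d : Int) :
    cnLoop 12 d [20, 19, 21, 20, 21, 22, 23, 23, 23, 23, 23, 22] (List.range 12) =
      if (22 : Int) ≤ d then some 12 else some 11 := by
  norm_num [cnLoop, List.range_succ]
  split_ifs <;> first | rfl | omega

-- ===== VERDICT (by name: the statement is the Claim_ definition above) =====
theorem constellation_number_spec : Claim_equal_constellation_number := by
  intro m d _
  unfold Spec_constellation_number
  by_cases h : 1 ≤ m ∧ m ≤ 12
  · obtain ⟨h1, h2⟩ := h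
    interval_cases m
    · exact pvMonth1 d
    · exact pvMonth2 d
    · exact pvMonth3 d
    · exact pvMonth4 d
    · exact pvMonth5 d
    · exact pvMonth6 d
    · exact pvMonth7 d
    · exact pvMonth8 d
    · exact pvMonth9 d
    · exact pvMonth10 d
    · exact pvMonth11 d
    · exact pvMonth12 d
  · show constellation_number m d = constellation_number_alt m d
    unfold constellation_number constellation_number_alt
    rw [if_pos h]
    exact cnLoop_none m d _ _ (by
      intro i hi
      have := List.mem_range.mp hi
      refine ⟨by omega, ?_⟩
      split_ifs <;> first | rfl | omega)
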